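-- pv_equiv track=rewrite | github.com/SanthaKumar-K-2004/SRE | inference.py | _build_network_partition_plan
-- ===== SOURCE A (Python) =====
-- from typing import Any, Dict, List, Optional
--
-- def _build_network_partition_plan(limit: int) -> List[str]:
--     """Build the fixed network-partition plan up to the task step cap."""
--     starter = [
--         "acknowledge_alert",
--         "inspect_logs",
--         "check_metrics",
--         "check_topology",
--         "check_service",
--     ]
--     filler = ["check_metrics", "check_topology", "check_service"]
--     plan = starter[:]
--     while len(plan) < limit:
--         plan.append(filler[(len(plan) - len(starter)) % len(filler)])
--     return plan[:limit]
-- ===== SOURCE B (Python) =====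
-- def _build_network_partition_plan(limit: int):
--     """Build the fixed network-partition plan up to the task step cap."""
--     starter = [
--         "acknowledge_alert",
--         "inspect_logs",
--         "check_metrics",
--         "check_topology",
--         "check_service",
--     ]
--     filler = ["check_metrics", "check_topology", "check_service"]
--     reps = max(0, -((5 - limit) // 3))  # = ceil((limit - 5) / 3), clamped at 0
--     return (starter + filler * reps)[:limit]
-- ===== Notes on version B (the rewrite author's own statement) =====
-- stated objective: simpler
-- what changed: Replaces the element-by-element while loop with modular indexing by closed-form block replication: one ceiling division gives the number of filler repetitions, then starter + filler*reps is sliced to limit.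
import Mathlib
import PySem

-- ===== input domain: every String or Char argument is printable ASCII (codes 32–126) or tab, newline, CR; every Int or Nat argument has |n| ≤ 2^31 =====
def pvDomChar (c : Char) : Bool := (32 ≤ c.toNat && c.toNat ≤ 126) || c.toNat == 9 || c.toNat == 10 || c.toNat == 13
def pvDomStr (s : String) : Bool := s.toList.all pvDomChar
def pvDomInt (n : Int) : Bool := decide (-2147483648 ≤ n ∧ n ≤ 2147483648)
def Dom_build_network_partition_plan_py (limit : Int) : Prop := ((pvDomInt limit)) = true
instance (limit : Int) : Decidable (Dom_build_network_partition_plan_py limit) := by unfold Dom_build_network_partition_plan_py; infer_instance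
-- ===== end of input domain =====

-- B replaces A's element-by-element while loop (modular indexing) by closed-form block
-- replication (ceiling-division repetition count, list concatenation, one slice); objective: simpler.

-- ===== PORT A =====
def pvStarter : List String :=
  ["acknowledge_alert", "inspect_logs", "check_metrics", "check_topology", "check_service"]

def pvFiller : List String := ["check_metrics", "check_topology", "check_service"]

-- the while loop of A; the filler index (len(plan)-len(starter)) % len(filler) is always in
-- range (0 ≤ mod < 3), so the `.getD ""` default is unreachable
def pvLoopA (limit : Int) (plan : List String) : List String :=
  if (plan.length : Int) < limit then
    pvLoopA limit
      (plan ++ [(PySem.List.pyGet? pvFiller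
        (PySem.Int.mod ((plan.length : Int) - (pvStarter.length : Int)) (pvFiller.length : Int))).getD ""])
  else plan
termination_by (limit - plan.length).toNat
decreasing_by simp only [List.length_append, List.length_cons, List.length_nil]; omega

def build_network_partition_plan_py (limit : Int) : List String :=
  PySem.List.slice (pvLoopA limit pvStarter) none (some limit)

-- ===== PORT B =====
def build_network_partition_plan_py_alt (limit : Int) : List String :=
  let reps := (max 0 (-(PySem.Int.floordiv (5 - limit) 3))).toNat
  PySem.List.slice (pvStarter ++ (List.replicate reps pvFiller).flatten) none (some limit)

-- ===== PRECONDITION & SPEC =====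
def Spec_build_network_partition_plan_py (limit : Int) (out : List String) : Prop := out = build_network_partition_plan_py_alt limit
instance (limit : Int) (out : List String) : Decidable (Spec_build_network_partition_plan_py limit out) := by unfold Spec_build_network_partition_plan_py; infer_instance

-- ===== CLAIM (what is proved, stated in full; the proofs are below) =====
def Claim_equal_build_network_partition_plan_py : Prop := ∀ (limit : Int), Dom_build_network_partition_plan_py limit → Spec_build_network_partition_plan_py limit (build_network_partition_plan_py limit)

-- ===== LEMMAS AND PROOFS =====

-- the i-th filler element, as a function of the absolute fill position
def pvFele (n : Nat) : String :=
  if n % 3 = 0 then "check_metrics" else if n % 3 = 1 then "check_topology" else "check_service"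

-- the fill sequence of length n starting at fill position s
def pvFill (s n : Nat) : List String := (List.range n).map (fun i => pvFele (s + i))

lemma pvFill_cons (s n : Nat) : pvFill s (n + 1) = pvFele s :: pvFill (s + 1) n := by
  simp [pvFill, List.range_succ_eq_map, List.map_map, Function.comp]
  exact fun a _ => by congr 1; omega

lemma pvFill_append (s a b : Nat) : pvFill s (a + b) = pvFill s a ++ pvFill (s + a) b := by
  unfold pvFill
  rw [List.range_add, List.map_append, List.map_map]
  congr 1
  exact List.map_congr_left (fun i _ => by simp [Function.comp]; congr 1; omega)

lemma pvFill_shift3 (s n : Nat) : pvFill (s + 3) n = pvFill s n := by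
  unfold pvFill
  exact List.map_congr_left (fun i _ => by
    unfold pvFele
    have h : (s + 3 + i) % 3 = (s + i) % 3 := by omega
    rw [h])

lemma pvFele_of_index (L : Nat) (h : 5 ≤ L) :
    (PySem.List.pyGet? pvFiller
      (PySem.Int.mod ((L : Int) - (pvStarter.length : Int)) (pvFiller.length : Int))).getD ""
    = pvFele (L - 5) := by
  have hsub : ((L : Int) - (pvStarter.length : Int)) = ((L - 5 : Nat) : Int) := by
    simp [pvStarter]; omega
  rw [hsub]
  show (PySem.List.pyGet? pvFiller (PySem.Int.mod ((L - 5 : Nat) : Int) ((3 : Nat) : Int))).getD "" = _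
  rw [PySem.Int.mod_natCast]
  have h3 : (L - 5) % 3 = 0 ∨ (L - 5) % 3 = 1 ∨ (L - 5) % 3 = 2 := by omega
  unfold pvFele
  rcases h3 with h | h | h <;> rw [h] <;> decide

lemma pvLoopA_eq (limit : Int) (plan : List String) (h5 : 5 ≤ plan.length) :
    pvLoopA limit plan = plan ++ pvFill (plan.length - 5) (limit - plan.length).toNat := by
  by_cases hlt : (plan.length : Int) < limit
  · rw [pvLoopA, if_pos hlt]
    have hrec := pvLoopA_eq limit
      (plan ++ [(PySem.List.pyGet? pvFiller
        (PySem.Int.mod ((plan.length : Int) - (pvStarter.length : Int)) (pvFiller.length : Int))).getD ""])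
      (by simp; omega)
    rw [hrec]
    rw [pvFele_of_index plan.length h5]
    have hn : (limit - plan.length).toNat = ((limit - (plan ++ [pvFele (plan.length - 5)]).length).toNat) + 1 := by
      simp; omega
    rw [hn, pvFill_cons, List.append_assoc]
    congr 1
    simp only [List.singleton_append, List.cons.injEq, true_and]
    have : (plan ++ [pvFele (plan.length - 5)]).length - 5 = (plan.length - 5) + 1 := by
      simp; omega
    rw [this]
  · rw [pvLoopA, if_neg hlt]
    have : (limit - plan.length).toNat = 0 := by omega
    simp [this, pvFill]
termination_by (limit - plan.length).toNat
decreasing_by simp only [List.length_append, List.length_cons, List.length_nil]; omega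

lemma pvFill_take (r n : Nat) (h : n ≤ 3 * r) :
    ((List.replicate r pvFiller).flatten).take n = pvFill 0 n := by
  induction r generalizing n with
  | zero =>
    have : n = 0 := by omega
    simp [this, pvFill]
  | succ r ih =>
    rw [List.replicate_succ, List.flatten_cons, List.take_append]
    by_cases h3 : n ≤ 3
    · have hf : ((List.replicate r pvFiller).flatten).take (n - pvFiller.length) = [] := by
        have : n - pvFiller.length = 0 := by simp [pvFiller]; omega
        simp [this]
      rw [hf, List.append_nil]
      interval_cases n <;> decide
    · have hlen : pvFiller.length = 3 := by decide
      rw [hlen]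
      have hsplit : n = 3 + (n - 3) := by omega
      rw [ih (n - 3) (by omega)]
      rw [List.take_of_length_le (by rw [hlen]; omega)]
      conv_lhs => rw [show pvFiller = pvFill 0 3 by decide]
      rw [← pvFill_shift3 0 (n - 3)]
      show pvFill 0 3 ++ pvFill (0 + 3) (n - 3) = pvFill 0 n
      rw [← pvFill_append]
      congr 1
      omega

-- ===== VERDICT (by name: the statement is the Claim_ definition above) =====
theorem build_network_partition_plan_py_spec : Claim_equal_build_network_partition_plan_py := by
  intro limit _
  unfold Spec_build_network_partition_plan_py build_network_partition_plan_py build_network_partition_plan_py_alt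
  have hA := pvLoopA_eq limit pvStarter (by decide)
  by_cases hle : limit ≤ 5
  · -- loop does not run and reps = 0: both sides slice the bare starter
    have hq : PySem.Int.floordiv (5 - limit) 3 ≥ 0 := by
      have := PySem.Int.le_floordiv_iff_mul_le (a := 5 - limit) (b := 3) (q := 0) (by omega)
      omega
    have hreps : (max 0 (-(PySem.Int.floordiv (5 - limit) 3))).toNat = 0 := by omega
    have hn : (limit - (pvStarter.length : Int)).toNat = 0 := by simp [pvStarter]; omega
    rw [hA, hn, hreps]
    simp [pvFill]
  · -- limit > 5: both sides are starter ++ (fill sequence of length limit-5)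
    have hlen5 : pvStarter.length = 5 := rfl
    rw [hA, hlen5]
    show _ = PySem.List.slice
      (pvStarter ++ (List.replicate (max 0 (-PySem.Int.floordiv (5 - limit) 3)).toNat pvFiller).flatten)
      none (some limit)
    rw [show (5 : Nat) - 5 = 0 from rfl, show ((5 : Nat) : Int) = (5 : Int) by norm_num]
    rw [PySem.List.slice_to _ (by omega), PySem.List.slice_to _ (by omega)]
    set q : Int := -(PySem.Int.floordiv (5 - limit) 3) with hqdef
    have hb := (PySem.Int.neg_floordiv_neg_eq_iff_of_pos (a := limit - 5) (b := 3)
      (q := q) (by omega)).mp (by rw [hqdef, show -(limit - 5) = 5 - limit by ring])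
    have hmax : max 0 q = q := by omega
    rw [hmax]
    have hfl : (pvFill 0 (limit - 5).toNat).length = (limit - 5).toNat := by
      simp [pvFill]
    rw [List.take_append, List.take_append, hlen5]
    rw [List.take_of_length_le (by rw [hlen5]; omega)]
    congr 1
    rw [List.take_of_length_le (by rw [hfl]; omega)]
    rw [pvFill_take q.toNat (limit.toNat - 5) (by omega)]
    congr 1
    omega
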